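-- pv_equiv track=rewrite | github.com/liuhz0926/algorithm_practicing_progress | Two_Pointers/1900/1900_0128.py | read_next_gene
-- ===== SOURCE A (Python) =====
-- def read_next_gene(start_index, gene):
--     # start_index 到头了
--     if start_index >= len(gene):
--         return 0, "", start_index
--     # 寻找下一个index
--     num_gene, gene_char, next_index = "", "", start_index
--     while gene_char == "":
--         # 当前是数字，则加入（如果数字是好几位的话。10, 100, 所以要一直count)
--         if gene[next_index].isdigit():
--             num_gene += gene[next_index]
--         # 不是数字了
--         else:
--             gene_char = gene[next_index]
--         # index count往前
--         next_index += 1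
--     return int(num_gene), gene_char, next_index
-- ===== SOURCE B (Python) =====
-- def read_next_gene(start_index, gene):
--     n = len(gene)
--     if start_index >= n:
--         return 0, "", start_index
--     # locate the first non-digit position at or after start_index, then slice
--     i = next((j for j in range(start_index, n) if not gene[j].isdigit()), n)
--     return int(gene[start_index:i]), gene[i], i + 1
-- ===== Notes on version B (the rewrite author's own statement) =====
-- stated objective: simpler
-- what changed: A accumulates digit characters one by one in a flag-controlled while loop; B instead finds the first non-digit position with a declarative generator scan and then reads the number with a single slice+int and the delimiter with one index, with no accumulator or flag.
-- outside the precondition, e.g. on read_next_gene(-2, '12a34'): A returns (3412, 'a', 3), B raises ValueError; on read_next_gene(0, 'ab'): A raises ValueError, B raises ValueError; on read_next_gene(0, '123'): A raises IndexError, B raises IndexError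
import Mathlib
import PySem

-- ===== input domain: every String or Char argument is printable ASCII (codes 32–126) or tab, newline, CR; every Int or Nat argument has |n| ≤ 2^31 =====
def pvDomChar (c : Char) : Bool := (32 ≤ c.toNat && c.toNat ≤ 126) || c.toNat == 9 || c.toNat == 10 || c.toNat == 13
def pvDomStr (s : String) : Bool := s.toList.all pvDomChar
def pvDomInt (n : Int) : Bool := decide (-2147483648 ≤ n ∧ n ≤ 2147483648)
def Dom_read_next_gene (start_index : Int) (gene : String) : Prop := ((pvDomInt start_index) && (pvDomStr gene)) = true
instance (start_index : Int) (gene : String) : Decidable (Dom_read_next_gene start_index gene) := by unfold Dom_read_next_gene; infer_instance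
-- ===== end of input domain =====

-- B replaces A's flag-controlled accumulate-characters loop by a declarative find-first-non-digit
-- scan followed by a slice+int conversion (objective: simpler/idiomatic; no speed claim).

-- ===== PORT A =====
-- A's while loop: accumulates digit chars into num, advances next_index, stops at the first
-- non-digit char.  Fuel bounds the recursion; whenever the Python loop terminates normally it
-- takes at most 2*len+1 iterations (indices run from start_index ≥ -len up to len-1), so fuel
-- exhaustion (and pyGet? = none, Python's IndexError) happen only where Python A raises.
def readLoopA (l : List Char) : Nat → List Char → Int → Int × String × Int
  | 0, _, next => (0, "", next)
  | fuel+1, num, next =>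
    match PySem.List.pyGet? l next with
    | none => (0, "", next)      -- IndexError in Python (outside Pre_)
    | some c =>
      if PySem.Chars.isdigit c then
        readLoopA l fuel (num ++ [c]) (next + 1)
      else
        ((PySem.Int.ofChars? num).getD 0, String.ofList [c], next + 1)

def read_next_gene (start_index : Int) (gene : String) : Int × String × Int :=
  if PySem.Str.len gene ≤ start_index then (0, "", start_index)
  else readLoopA gene.toList (2 * gene.toList.length + 1) [] start_index

-- ===== PORT B =====
def read_next_gene_alt (start_index : Int) (gene : String) : Int × String × Int :=
  let l := gene.toList
  let n : Int := l.length
  if n ≤ start_index then (0, "", start_index)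
  else
    -- i = next((j for j in range(start_index, n) if not gene[j].isdigit()), n)
    let i : Int :=
      ((PySem.List.pyRange start_index n 1).find?
        (fun j => !(PySem.Chars.isdigit (PySem.List.pyGetD l j ' ')))).getD n
    let numv : Int := (PySem.Int.ofChars? (PySem.List.slice l (some start_index) (some i))).getD 0
    match PySem.List.pyGet? l i with
    | some c => (numv, String.ofList [c], i + 1)
    | none => (numv, "", i + 1)   -- IndexError in Python (outside Pre_)

-- ===== PRECONDITION & SPEC =====
-- Pre_ excludes the inputs where A raises (ValueError from int('') when the char at start_index
-- is not a digit, IndexError when everything from start_index on is digits or start_index < -len)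
-- and the negative start_index inputs, where A's returned value comes from accidental
-- negative-index wraparound (it can even concatenate digits from the end and the start of gene).
def Pre_read_next_gene (start_index : Int) (gene : String) : Prop :=
  0 ≤ start_index ∧
  ((gene.toList.length : Int) ≤ start_index ∨
    (PySem.Chars.isdigit ((gene.toList.drop start_index.toNat).headD ' ') = true ∧
     ¬ ((gene.toList.drop start_index.toNat).all PySem.Chars.isdigit = true)))
instance (start_index : Int) (gene : String) : Decidable (Pre_read_next_gene start_index gene) := by
  unfold Pre_read_next_gene; infer_instance

def pvWitness_read_next_gene : Int × String := (0, "12a34")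

def Spec_read_next_gene (start_index : Int) (gene : String) (out : Int × String × Int) : Prop := out = read_next_gene_alt start_index gene
instance (start_index : Int) (gene : String) (out : Int × String × Int) : Decidable (Spec_read_next_gene start_index gene out) := by unfold Spec_read_next_gene; infer_instance

-- ===== CLAIM (what is proved, stated in full; the proofs are below) =====
def Claim_equal_read_next_gene : Prop := ∀ (start_index : Int) (gene : String), Dom_read_next_gene start_index gene → Pre_read_next_gene start_index gene → Spec_read_next_gene start_index gene (read_next_gene start_index gene)

-- ===== LEMMAS AND PROOFS =====

-- A's loop, started at index m with accumulator num, where every char in [m,k) is a digit and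
-- l[k] is not: it returns (int(num ++ l[m:k]), l[k], k+1).
theorem readLoopA_eq (l : List Char) (k : Nat) (hk : k < l.length)
    (hknd : PySem.Chars.isdigit l[k] = false) :
    ∀ (m : Nat) (fuel : Nat) (num : List Char), m ≤ k → k - m < fuel →
    (∀ (jj : Nat) (hjj : jj < l.length), m ≤ jj → jj < k → PySem.Chars.isdigit l[jj] = true) →
    readLoopA l fuel num (m : Int) =
      ((PySem.Int.ofChars? (num ++ (l.drop m).take (k - m))).getD 0,
        String.ofList [l[k]], (k : Int) + 1) := by
  intro m fuel num hmk hfuel hall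
  induction fuel generalizing m num with
  | zero => omega
  | succ fuel ih =>
    have hm : m < l.length := lt_of_le_of_lt hmk hk
    rw [readLoopA, PySem.List.pyGet?_ofNat l m hm]
    by_cases hmkeq : m = k
    · subst hmkeq
      simp [hknd]
    · have hmlt : m < k := lt_of_le_of_ne hmk hmkeq
      have hdig : PySem.Chars.isdigit l[m] = true := hall m hm le_rfl hmlt
      simp only [hdig, if_pos]
      have hcast : (m : Int) + 1 = ((m + 1 : Nat) : Int) := by push_cast; ring
      rw [hcast, ih (m + 1) (num ++ [l[m]]) (by omega) (by omega)
        (fun jj hjj h1 h2 => hall jj hjj (by omega) h2)]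
      have hdrop : l.drop m = l[m] :: l.drop (m + 1) := List.drop_eq_getElem_cons hm
      have htake : (l.drop m).take (k - m) = l[m] :: (l.drop (m + 1)).take (k - (m + 1)) := by
        rw [hdrop]
        have : k - m = (k - (m + 1)) + 1 := by omega
        rw [this, List.take_succ_cons]
      rw [htake]
      simp

-- B's find-first-non-digit scan, under the same hypotheses, returns some k.
theorem findB_eq (l : List Char) (k : Nat) (hk : k < l.length)
    (hknd : PySem.Chars.isdigit l[k] = false) :
    ∀ (m : Nat), m ≤ k →
    (∀ (jj : Nat) (hjj : jj < l.length), m ≤ jj → jj < k → PySem.Chars.isdigit l[jj] = true) →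
    ((PySem.List.pyRange (m : Int) (l.length : Int) 1).find?
        (fun j => !(PySem.Chars.isdigit (PySem.List.pyGetD l j ' ')))) = some (k : Int) := by
  intro m
  induction hn : k - m generalizing m with
  | zero =>
    intro hmk _
    have hmkeq : m = k := by omega
    subst hmkeq
    rw [PySem.List.pyRange_one_cons (by exact_mod_cast hk), List.find?_cons_of_pos]
    simp [PySem.List.pyGetD_ofNat l m ' ' hk, hknd]
  | succ d ih =>
    intro hmk hall
    have hm : m < l.length := lt_of_le_of_lt hmk hk
    have hdig : PySem.Chars.isdigit l[m] = true := hall m hm le_rfl (by omega)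
    rw [PySem.List.pyRange_one_cons (by exact_mod_cast hm), List.find?_cons_of_neg]
    · have hcast : (m : Int) + 1 = ((m + 1 : Nat) : Int) := by push_cast; ring
      rw [hcast]
      exact ih (m + 1) (by omega) (by omega) (fun jj hjj h1 h2 => hall jj hjj (by omega) h2)
    · simp [PySem.List.pyGetD_ofNat l m ' ' hm, hdig]

-- ===== VERDICT (by name: the statement is the Claim_ definition above) =====
theorem read_next_gene_spec : Claim_equal_read_next_gene := by
  intro start_index gene _hdom hpre
  unfold Spec_read_next_gene read_next_gene read_next_gene_alt
  obtain ⟨hnn, hpre⟩ := hpre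
  rw [PySem.Str.len_eq]
  simp only []
  by_cases hend : (gene.toList.length : Int) ≤ start_index
  · rw [if_pos hend, if_pos hend]
  · rw [if_neg hend, if_neg hend]
    set l := gene.toList with hl
    have hs : start_index.toNat < l.length := by omega
    have hstart : start_index = ((start_index.toNat : Nat) : Int) := by omega
    rcases hpre with h | ⟨_hhd, hnall⟩
    · omega
    · -- k := first non-digit index at/after start_index
      set s := start_index.toNat with hsdef
      set t := l.drop s with ht
      have hex : ∃ c ∈ t, (!(PySem.Chars.isdigit c)) = true := by
        by_contra hno
        push Not at hno
        exact hnall (List.all_eq_true.mpr (fun c hc => by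
          have := hno c hc; simpa using this))
      have hjlt : t.findIdx (fun c => !(PySem.Chars.isdigit c)) < t.length :=
        List.findIdx_lt_length.mpr hex
      set j := t.findIdx (fun c => !(PySem.Chars.isdigit c)) with hj
      set k := s + j with hkdef
      have htlen : t.length = l.length - s := by simp [ht]
      have hk : k < l.length := by omega
      have htj : t[j] = l[k]'hk := by
        simp [ht, hkdef, List.getElem_drop]
      have hknd : PySem.Chars.isdigit (l[k]'hk) = false := by
        have := List.findIdx_getElem (xs := t) (p := fun c => !(PySem.Chars.isdigit c)) (w := hjlt)
        rw [htj] at this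
        simpa using this
      have hall : ∀ (jj : Nat) (hjj : jj < l.length), s ≤ jj → jj < k →
          PySem.Chars.isdigit (l[jj]'hjj) = true := by
        intro jj hjj h1 h2
        have hlt : jj - s < j := by omega
        have := List.not_of_lt_findIdx (xs := t) (p := fun c => !(PySem.Chars.isdigit c))
          (i := jj - s) (by omega)
        have h3 : s + (jj - s) = jj := by omega
        simp only [ht, List.getElem_drop, h3] at this
        simpa using this
      rw [hstart]
      rw [readLoopA_eq l k hk hknd s (2 * l.length + 1) [] (by omega) (by omega) hall]
      rw [findB_eq l k hk hknd s (by omega) hall]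
      simp only [Option.getD_some]
      rw [PySem.List.pyGet?_ofNat l k hk]
      rw [PySem.List.slice_toNat l (by positivity) (by positivity)]
      simp [Int.toNat_natCast]
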